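-- pv_equiv track=rewrite | github.com/EricT22/Algorithms | hw/pattern_matching/kmp.py | fail_links_zbased
-- ===== SOURCE A (Python) =====
-- def fail_links_zbased(sub):
--     fail = [0 for x in range(len(sub))]
--
--     fail[0] = 0
--
--     for i in range(1, len(sub)):
--         temp = fail[i - 1]
--
--         while temp > 0 and ord(sub[temp - 1]) != ord(sub[i - 1]):
--             temp = fail[temp - 1]
--
--         fail[i] = temp + 1
--
--     return fail
-- ===== SOURCE B (Python) =====
-- def fail_links_zbased(sub):
--     n = len(sub)
--     out = [0] * n
--     for i in range(1, n):
--         k = i - 1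
--         while sub[:k] != sub[i-k:i]:
--             k -= 1
--         out[i] = k + 1
--     return out
-- ===== Notes on version B (the rewrite author's own statement) =====
-- stated objective: simpler
-- what changed: Replaces A's failure-link reuse (KMP while-loop chasing fail[temp-1]) by a direct definition-level search: for each i, scan k downward and compare the slices sub[:k] and sub[i-k:i] until they match, so no previously computed fail entries are read at all.
import Mathlib
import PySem

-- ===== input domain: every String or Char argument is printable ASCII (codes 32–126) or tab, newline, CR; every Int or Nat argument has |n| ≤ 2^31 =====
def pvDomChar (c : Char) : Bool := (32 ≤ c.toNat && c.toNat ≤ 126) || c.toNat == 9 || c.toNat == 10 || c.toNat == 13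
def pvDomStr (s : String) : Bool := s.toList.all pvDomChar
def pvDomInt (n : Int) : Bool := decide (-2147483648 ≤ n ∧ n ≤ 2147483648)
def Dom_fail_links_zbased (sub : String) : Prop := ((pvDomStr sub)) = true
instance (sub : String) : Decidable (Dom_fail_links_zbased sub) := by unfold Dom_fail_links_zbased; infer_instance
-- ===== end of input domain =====

-- B replaces A's failure-link (KMP) computation by a direct downward slice-comparison
-- search for each position's longest border: simpler to read, not faster.


-- ===== PORT A =====
-- the inner 'while temp > 0 and ord(sub[temp-1]) != ord(sub[i-1])' loop; fuel-guarded
-- (fuel only makes the recursion total; inside Pre_ it is proved never to run out)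
def kmpWhile (s : List Char) (fail : List Int) (c : Char) : Nat → Int → Int
  | 0, temp => temp
  | fuel + 1, temp =>
    if temp > 0 ∧ (s.getD (temp.toNat - 1) ' ').toNat ≠ c.toNat then
      kmpWhile s fail c fuel (fail.getD (temp.toNat - 1) 0)
    else temp

-- one iteration of A's for-loop body
def kmpStep (s : List Char) (fail : List Int) (i : Nat) : List Int :=
  let temp := kmpWhile s fail (s.getD (i - 1) ' ') i (fail.getD (i - 1) 0)
  fail.set i (temp + 1)

def fail_links_zbased (sub : String) : List Int :=
  let s := sub.toList
  let fail := (List.replicate s.length (0 : Int)).set 0 0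
  (List.range' 1 (s.length - 1)).foldl (kmpStep s) fail

-- ===== PORT B =====
-- 'k = i - 1; while sub[:k] != sub[i-k:i]: k -= 1' — structural recursion on k
def bscan (s : List Char) (i : Nat) : Nat → Nat
  | 0 => 0
  | k + 1 =>
    if PySem.List.slice s none (some ((k + 1 : Nat) : Int)) ≠
        PySem.List.slice s (some ((i - (k + 1) : Nat) : Int)) (some ((i : Nat) : Int)) then
      bscan s i k
    else k + 1

def fail_links_zbased_alt (sub : String) : List Int :=
  let s := sub.toList
  (List.range' 1 (s.length - 1)).foldl
    (fun out i => out.set i ((bscan s i (i - 1) : Int) + 1))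
    (List.replicate s.length (0 : Int))

-- ===== PRECONDITION & SPEC =====
-- A raises IndexError on the empty string (fail[0] = 0 on an empty list); that is all Pre_ excludes.
def Pre_fail_links_zbased (sub : String) : Prop := sub ≠ ""
instance (sub : String) : Decidable (Pre_fail_links_zbased sub) := by unfold Pre_fail_links_zbased; infer_instance
def pvWitness_fail_links_zbased : String := "abab"

def Spec_fail_links_zbased (sub : String) (out : List Int) : Prop := out = fail_links_zbased_alt sub
instance (sub : String) (out : List Int) : Decidable (Spec_fail_links_zbased sub out) := by unfold Spec_fail_links_zbased; infer_instance

-- ===== CLAIM (what is proved, stated in full; the proofs are below) =====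
def Claim_equal_fail_links_zbased : Prop := ∀ (sub : String), Dom_fail_links_zbased sub → Pre_fail_links_zbased sub → Spec_fail_links_zbased sub (fail_links_zbased sub)

-- ===== LEMMAS AND PROOFS =====

-- k is a border of the length-i prefix of s
def Bord (s : List Char) (i k : Nat) : Prop :=
  k < i ∧ s.take k = (s.take i).drop (i - k)

-- the value A and B both store at index j (0 at j = 0)
def gval (s : List Char) (j : Nat) : Int :=
  if j = 0 then 0 else ((bscan s j (j - 1) : Nat) : Int) + 1

-- state of the output list after the first m loop iterations of either port
def InvP (s : List Char) (m : Nat) (F : List Int) : Prop :=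
  F.length = s.length ∧ ∀ j, F.getD j 0 = if 1 ≤ j ∧ j ≤ m then gval s j else 0

lemma bscan_le (s : List Char) (i k : Nat) : bscan s i k ≤ k := by
  induction k with
  | zero => simp [bscan]
  | succ k ih =>
    simp only [bscan]; split
    · exact le_trans ih (Nat.le_succ k)
    · exact le_refl _

lemma bord_zero (s : List Char) (i : Nat) (hi : 1 ≤ i) (hin : i ≤ s.length) :
    Bord s i 0 := by
  refine ⟨hi, ?_⟩
  simp [List.drop_eq_nil_of_le, List.length_take]

-- the slice condition in bscan, rewritten as the Bord equation
lemma slice_cond_iff (s : List Char) (i k : Nat) (hk : k ≤ i) (hin : i ≤ s.length) :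
    (PySem.List.slice s none (some ((k : Nat) : Int)) =
      PySem.List.slice s (some ((i - k : Nat) : Int)) (some ((i : Nat) : Int)))
      ↔ s.take k = (s.take i).drop (i - k) := by
  rw [PySem.List.slice_to_natCast, PySem.List.slice_natCast]
  have h1 : i - (i - k) = k := by omega
  have h2 : (s.take i).drop (i - k) = (s.drop (i - k)).take (i - (i - k)) := by
    rw [List.drop_take]
  rw [h2, h1]

lemma bscan_bord (s : List Char) (i k : Nat) (hi : 1 ≤ i) (hk : k < i) (hin : i ≤ s.length) :
    Bord s i (bscan s i k) := by
  induction k with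
  | zero => simpa [bscan] using bord_zero s i hi hin
  | succ k ih =>
    simp only [bscan]; split
    · exact ih (by omega)
    · rename_i h
      rw [not_not] at h
      exact ⟨hk, (slice_cond_iff s i (k + 1) (by omega) hin).mp h⟩

lemma bscan_max (s : List Char) (i k : Nat) (hk : k < i) (hin : i ≤ s.length)
    (j : Nat) (hj : j ≤ k) (hb : Bord s i j) : j ≤ bscan s i k := by
  induction k with
  | zero => simpa [bscan] using hj
  | succ k ih =>
    simp only [bscan]; split
    · rename_i h
      rcases Nat.lt_or_ge j (k + 1) with hlt | hge
      · exact ih (by omega) (by omega)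
      · exfalso
        have hj1 : j = k + 1 := by omega
        exact h (by rw [← hj1]; exact (slice_cond_iff s i j (by omega) hin).mpr hb.2)
    · exact hj

-- extension: k+1 borders the length-(m+1) prefix iff k borders the length-m prefix and chars match
lemma bord_succ_iff (s : List Char) (m k : Nat) (hin : m < s.length) :
    Bord s (m + 1) (k + 1) ↔ (Bord s m k ∧ s.getD k ' ' = s.getD m ' ') := by
  by_cases hk : k < m
  · have hkn : k < s.length := by omega
    have hsk : s.take (k + 1) = s.take k ++ [s.getD k ' '] := by
      rw [List.take_add_one, List.getElem?_eq_getElem hkn, List.getD_eq_getElem _ _ hkn]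
      rfl
    have hsm : s.take (m + 1) = s.take m ++ [s.getD m ' '] := by
      rw [List.take_add_one, List.getElem?_eq_getElem hin, List.getD_eq_getElem _ _ hin]
      rfl
    have hdrop : (s.take (m + 1)).drop (m + 1 - (k + 1)) =
        (s.take m).drop (m - k) ++ [s.getD m ' '] := by
      rw [hsm, show m + 1 - (k + 1) = m - k by omega,
        List.drop_append_of_le_length (by simp [List.length_take]; omega)]
    have hlen1 : (s.take k).length = k := by simp [List.length_take]; omega
    have hlen2 : ((s.take m).drop (m - k)).length = k := by
      simp [List.length_take]; omega
    constructor
    · rintro ⟨h1, h2⟩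
      rw [hsk, hdrop] at h2
      obtain ⟨e1, e2⟩ := List.append_inj h2 (hlen1.trans hlen2.symm)
      refine ⟨⟨hk, e1⟩, ?_⟩
      simpa using e2
    · rintro ⟨⟨h1, h2⟩, hc⟩
      refine ⟨by omega, ?_⟩
      rw [hsk, hdrop, h2, hc]
  · constructor
    · rintro ⟨h1, _⟩; omega
    · rintro ⟨⟨h1, _⟩, _⟩; omega

-- a shorter border of the same prefix is a border of a longer one
lemma bord_chain (s : List Char) (i j k : Nat) (hjk : j < k)
    (hj : Bord s i j) (hk : Bord s i k) : Bord s k j := by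
  obtain ⟨hj1, hj2⟩ := hj
  obtain ⟨hk1, hk2⟩ := hk
  refine ⟨hjk, ?_⟩
  rw [hj2, hk2, List.drop_drop]
  congr 1
  omega

-- a border of a border is a border
lemma bord_trans (s : List Char) (i m j : Nat)
    (hj : Bord s m j) (hm : Bord s i m) : Bord s i j := by
  obtain ⟨hj1, hj2⟩ := hj
  obtain ⟨hm1, hm2⟩ := hm
  refine ⟨by omega, ?_⟩
  rw [hj2, hm2, List.drop_drop]
  congr 1
  omega


lemma char_toNat_inj (a b : Char) (h : a.toNat = b.toNat) : a = b := by
  apply Char.ext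
  apply UInt32.toBitVec_inj.mp
  apply BitVec.toNat_inj.mp
  exact h

lemma getD_set_ite (l : List Int) (i j : Nat) (v : Int) :
    (l.set i v).getD j 0 = if i = j ∧ i < l.length then v else l.getD j 0 := by
  rw [List.getD_eq_getElem?_getD, List.getD_eq_getElem?_getD, List.getElem?_set]
  by_cases h1 : i = j
  · subst h1
    by_cases h2 : i < l.length <;> simp [h2]
  · simp [h1]

lemma getD_init (n j : Nat) : ((List.replicate n (0 : Int)).set 0 0).getD j 0 = 0 := by
  rw [getD_set_ite]
  split
  · rfl
  · rw [List.getD_eq_getElem?_getD, List.getElem?_replicate]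
    split <;> rfl

-- correctness of A's inner while loop: it lands on the longest border of the length-i prefix
lemma kmpWhile_eq (s : List Char) (F : List Int) (i : Nat)
    (hi : 1 ≤ i) (hin : i ≤ s.length)
    (hF : ∀ j, j < i → F.getD j 0 = gval s j) :
    ∀ fuel (t : Nat), t ≤ fuel →
      (t = 0 ∨ (1 ≤ t ∧ Bord s (i - 1) (t - 1))) →
      (∀ k, Bord s i k → k ≤ t) →
      kmpWhile s F (s.getD (i - 1) ' ') fuel ((t : Nat) : Int) =
        ((bscan s i (i - 1) : Nat) : Int) := by
  intro fuel
  induction fuel with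
  | zero =>
    intro t hle _ hub
    have ht : t = 0 := by omega
    subst ht
    have hm := hub _ (bscan_bord s i (i - 1) hi (by omega) hin)
    have h0 : bscan s i (i - 1) = 0 := by omega
    simp [kmpWhile, h0]
  | succ fuel ih =>
    intro t hle hpos hub
    have hmb := bscan_bord s i (i - 1) hi (by omega) hin
    simp only [kmpWhile]
    split
    · rename_i hc
      obtain ⟨hc1, hc2⟩ := hc
      have ht1 : 1 ≤ t := by exact_mod_cast hc1
      rcases hpos with h0 | ⟨_, hbt⟩
      · omega
      · -- t > 0, chars differ; follow the failure link
        have hti : t - 1 < i - 1 := hbt.1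
        have htn : (t : Int).toNat - 1 = t - 1 := by
          simp [Int.toNat_natCast]
        rw [htn, hF (t - 1) (by omega)]
        -- the next value of temp, as a natural number
        by_cases h10 : t - 1 = 0
        · -- fail[0] = 0
          have : gval s (t - 1) = ((0 : Nat) : Int) := by simp [gval, h10]
          rw [this]
          apply ih 0 (by omega) (Or.inl rfl)
          intro k hk
          by_cases hk0 : k = 0
          · omega
          · exfalso
            have hki : k ≤ t := hub k hk
            have hkt : k ≠ t := by
              intro he
              apply hc2
              have : Bord s ((i - 1) + 1) ((t - 1) + 1) := by
                have e1 : (i - 1) + 1 = i := by omega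
                have e2 : (t - 1) + 1 = t := by omega
                rw [e1, e2, ← he]; exact hk
              have := ((bord_succ_iff s (i - 1) (t - 1) (by omega)).mp this).2
              rw [htn, this]
            -- k < t = 1, k ≠ 0: impossible
            omega
        · have : gval s (t - 1) = ((bscan s (t - 1) (t - 1 - 1) + 1 : Nat) : Int) := by
            simp [gval, h10]
          rw [this]
          set u := bscan s (t - 1) (t - 1 - 1) + 1 with hu
          have hbu : bscan s (t - 1) (t - 1 - 1) ≤ t - 1 - 1 := bscan_le ..
          have htn' : t - 1 ≤ s.length := by omega
          have hbord_u : Bord s (t - 1) (u - 1) := by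
            have := bscan_bord s (t - 1) (t - 1 - 1) (by omega) (by omega) htn'
            simpa [hu] using this
          apply ih u (by omega)
          · right
            refine ⟨by omega, bord_trans s (i - 1) (t - 1) (u - 1) hbord_u hbt⟩
          · intro k hk
            have hki : k ≤ t := hub k hk
            have hkt : k ≠ t := by
              intro he
              apply hc2
              have : Bord s ((i - 1) + 1) ((t - 1) + 1) := by
                have e1 : (i - 1) + 1 = i := by omega
                have e2 : (t - 1) + 1 = t := by omega
                rw [e1, e2, ← he]; exact hk
              have := ((bord_succ_iff s (i - 1) (t - 1) (by omega)).mp this).2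
              rw [htn, this]
            by_cases hk0 : k = 0
            · omega
            · have hbk : Bord s (i - 1) (k - 1) := by
                have : Bord s ((i - 1) + 1) ((k - 1) + 1) := by
                  have e1 : (i - 1) + 1 = i := by omega
                  have e2 : (k - 1) + 1 = k := by omega
                  rw [e1, e2]; exact hk
                exact ((bord_succ_iff s (i - 1) (k - 1) (by omega)).mp this).1
              have hchain : Bord s (t - 1) (k - 1) :=
                bord_chain s (i - 1) (k - 1) (t - 1) (by omega) hbk hbt
              have := bscan_max s (t - 1) (t - 1 - 1) (by omega) htn'
                (k - 1) (by omega) hchain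
              omega
    · rename_i hc
      -- loop exits: t is the longest border of the length-i prefix
      rw [Decidable.not_and_iff_not_or_not] at hc
      have hmt : bscan s i (i - 1) ≤ t := hub _ hmb
      by_cases ht0 : t = 0
      · have : bscan s i (i - 1) = 0 := by omega
        rw [ht0, this]
      · rcases hpos with h | ⟨_, hbt⟩
        · omega
        · rcases hc with h | h
          · exfalso; apply h; exact_mod_cast Nat.pos_of_ne_zero ht0
          · rw [not_not] at h
            have htn : (t : Int).toNat - 1 = t - 1 := by simp [Int.toNat_natCast]
            rw [htn] at h
            have hchars : s.getD (t - 1) ' ' = s.getD (i - 1) ' ' := char_toNat_inj _ _ h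
            have hbit : Bord s i t := by
              have := (bord_succ_iff s (i - 1) (t - 1) (by omega)).mpr ⟨hbt, hchars⟩
              have e1 : (i - 1) + 1 = i := by omega
              have e2 : (t - 1) + 1 = t := by omega
              rwa [e1, e2] at this
            have hti2 : t < i := hbit.1
            have := bscan_max s i (i - 1) (by omega) hin t (by omega) hbit
            have he : t = bscan s i (i - 1) := by omega
            rw [he]

-- invariant of A's for-loop
lemma invA (s : List Char) (hn : 1 ≤ s.length) :
    ∀ m, m ≤ s.length - 1 →
      InvP s m ((List.range' 1 m).foldl (kmpStep s)
        ((List.replicate s.length (0 : Int)).set 0 0)) := by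
  intro m
  induction m with
  | zero =>
    intro _
    simp only [List.range'_zero, List.foldl_nil]
    refine ⟨by simp, fun j => ?_⟩
    rw [getD_init, if_neg (by omega)]
  | succ m ihm =>
    intro hm
    obtain ⟨hlen, hget⟩ := ihm (by omega)
    rw [List.range'_concat, List.foldl_append]
    simp only [Nat.one_mul]
    set F := (List.range' 1 m).foldl (kmpStep s)
      ((List.replicate s.length (0 : Int)).set 0 0) with hFdef
    simp only [List.foldl_cons, List.foldl_nil]
    have hi1 : (1 + m) - 1 = m := by omega
    have hFj : ∀ j, j < 1 + m → F.getD j 0 = gval s j := by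
      intro j hj
      rw [hget j]
      by_cases hj0 : j = 0
      · simp [hj0, gval]
      · simp [show 1 ≤ j ∧ j ≤ m by omega]
    -- initial temp value
    have hinit : F.getD ((1 + m) - 1) 0 = gval s m := by rw [hi1]; exact hFj m (by omega)
    have hwhile : kmpWhile s F (s.getD ((1 + m) - 1) ' ') (1 + m) (F.getD ((1 + m) - 1) 0) =
        ((bscan s (1 + m) ((1 + m) - 1) : Nat) : Int) := by
      rw [hinit]
      by_cases hm0 : m = 0
      · have : gval s m = ((0 : Nat) : Int) := by simp [gval, hm0]
        rw [this]
        apply kmpWhile_eq s F (1 + m) (by omega) (by omega) hFj (1 + m) 0 (by omega)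
          (Or.inl rfl)
        intro k hk
        have := hk.1
        omega
      · have hmn : m ≤ s.length := by omega
        have : gval s m = ((bscan s m (m - 1) + 1 : Nat) : Int) := by simp [gval, hm0]
        rw [this]
        have hmb := bscan_bord s m (m - 1) (by omega) (by omega) hmn
        have hmle := bscan_le s m (m - 1)
        apply kmpWhile_eq s F (1 + m) (by omega) (by omega) hFj (1 + m) _
          (by omega)
        · right
          refine ⟨by omega, ?_⟩
          simpa [hi1, Nat.add_sub_cancel] using hmb
        · intro k hk
          by_cases hk0 : k = 0
          · omega
          · have hbk : Bord s m (k - 1) := by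
              have : Bord s (((1 + m) - 1) + 1) ((k - 1) + 1) := by
                have e1 : ((1 + m) - 1) + 1 = 1 + m := by omega
                have e2 : (k - 1) + 1 = k := by omega
                rw [e1, e2]; exact hk
              have := ((bord_succ_iff s ((1 + m) - 1) (k - 1) (by omega)).mp this).1
              simpa [hi1] using this
            have hkm : k - 1 < m := hbk.1
            have := bscan_max s m (m - 1) (by omega) hmn (k - 1) (by omega) hbk
            omega
    refine ⟨?_, ?_⟩
    · simp [kmpStep, hlen]
    · intro j
      simp only [kmpStep]
      rw [hwhile, getD_set_ite, hget j]
      by_cases hj : 1 + m = j ∧ 1 + m < F.length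
      · rw [if_pos hj]
        have hj1 : j = 1 + m := hj.1.symm
        rw [if_pos (by omega)]
        have : j ≠ 0 := by omega
        simp [gval, hj1, Nat.add_comm 1 m]
      · rw [if_neg hj]
        have hjm : ¬ (1 + m = j) ∨ ¬ (1 + m < F.length) := by tauto
        have hlen' : 1 + m < F.length := by omega
        have hne : j ≠ 1 + m := by
          rcases hjm with h | h
          · omega
          · omega
        by_cases hc1 : 1 ≤ j ∧ j ≤ m
        · rw [if_pos hc1, if_pos (by omega)]
        · rw [if_neg hc1, if_neg (by omega)]

-- invariant of B's for-loop
lemma invB (s : List Char) (hn : 1 ≤ s.length) :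
    ∀ m, m ≤ s.length - 1 →
      InvP s m ((List.range' 1 m).foldl
        (fun out i => out.set i ((bscan s i (i - 1) : Int) + 1))
        (List.replicate s.length (0 : Int))) := by
  intro m
  induction m with
  | zero =>
    intro _
    simp only [List.range'_zero, List.foldl_nil]
    refine ⟨by simp, fun j => ?_⟩
    rw [if_neg (by omega), List.getD_eq_getElem?_getD, List.getElem?_replicate]
    split <;> rfl
  | succ m ihm =>
    intro hm
    obtain ⟨hlen, hget⟩ := ihm (by omega)
    rw [List.range'_concat, List.foldl_append]
    simp only [Nat.one_mul]
    set F := (List.range' 1 m).foldl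
      (fun out i => out.set i ((bscan s i (i - 1) : Int) + 1))
      (List.replicate s.length (0 : Int)) with hFdef
    simp only [List.foldl_cons, List.foldl_nil]
    refine ⟨by simp [hlen], ?_⟩
    intro j
    rw [getD_set_ite, hget j]
    by_cases hj : 1 + m = j ∧ 1 + m < F.length
    · rw [if_pos hj]
      have hj1 : j = 1 + m := hj.1.symm
      rw [if_pos (by omega)]
      have : j ≠ 0 := by omega
      simp [gval, hj1, Nat.add_comm 1 m]
    · rw [if_neg hj]
      have hlen' : 1 + m < F.length := by omega
      have hne : j ≠ 1 + m := by tauto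
      by_cases hc1 : 1 ≤ j ∧ j ≤ m
      · rw [if_pos hc1, if_pos (by omega)]
      · rw [if_neg hc1, if_neg (by omega)]

-- ===== VERDICT (by name: the statement is the Claim_ definition above) =====
theorem fail_links_zbased_spec : Claim_equal_fail_links_zbased := by
  intro sub _ hpre
  unfold Spec_fail_links_zbased fail_links_zbased fail_links_zbased_alt
  set s := sub.toList with hs
  have hn : 1 ≤ s.length := by
    have hne : s ≠ [] := by
      intro h
      exact hpre (String.toList_eq_nil_iff.mp (hs ▸ h))
    exact List.length_pos_iff.mpr hne
  obtain ⟨hlA, hgA⟩ := invA s hn (s.length - 1) (le_refl _)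
  obtain ⟨hlB, hgB⟩ := invB s hn (s.length - 1) (le_refl _)
  apply List.ext_getElem (by rw [hlA, hlB])
  intro j h1 h2
  have eA := hgA j
  have eB := hgB j
  rw [List.getD_eq_getElem _ _ (by omega)] at eA
  rw [List.getD_eq_getElem _ _ (by omega)] at eB
  rw [eA, eB]
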